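-- pv_equiv track=rewrite | github.com/tzhang/quant-bot | src/data/alternative_data.py | _analyze_risk_sentiment
-- ===== SOURCE A (Python) =====
-- from typing import Dict, List, Optional, Union, Any, Tuple
--
-- def _analyze_risk_sentiment(risk_indicators: List[str]) -> str:
--     """
--     分析风险情绪
--
--     Args:
--         risk_indicators: 风险指标列表
--
--     Returns:
--         风险情绪评估
--     """
--     risk_on_signals = ['falling_yields', 'gold_weakness', 'dollar_weakness']
--     risk_off_signals = ['rising_yields', 'gold_strength', 'dollar_strength']
--
--     risk_on_count = sum(1 for signal in risk_indicators if signal in risk_on_signals)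
--     risk_off_count = sum(1 for signal in risk_indicators if signal in risk_off_signals)
--
--     if risk_off_count > risk_on_count:
--         return 'risk_off'
--     elif risk_on_count > risk_off_count:
--         return 'risk_on'
--     else:
--         return 'neutral'
-- ===== SOURCE B (Python) =====
-- def _analyze_risk_sentiment(risk_indicators):
--     weights = {
--         'falling_yields': 1, 'gold_weakness': 1, 'dollar_weakness': 1,
--         'rising_yields': -1, 'gold_strength': -1, 'dollar_strength': -1,
--     }
--     score = 0
--     for ind in risk_indicators:
--         score += weights.get(ind, 0)
--     if score > 0:
--         return 'risk_on'
--     if score < 0: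
--         return 'risk_off'
--     return 'neutral'
-- ===== Notes on version B (the rewrite author's own statement) =====
-- stated objective: simpler
-- what changed: Replaces the two filtered-count passes over the list with a single pass accumulating a signed score from a +1/-1 weight dict, then classifies by the sign of the net score.
import Mathlib
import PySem

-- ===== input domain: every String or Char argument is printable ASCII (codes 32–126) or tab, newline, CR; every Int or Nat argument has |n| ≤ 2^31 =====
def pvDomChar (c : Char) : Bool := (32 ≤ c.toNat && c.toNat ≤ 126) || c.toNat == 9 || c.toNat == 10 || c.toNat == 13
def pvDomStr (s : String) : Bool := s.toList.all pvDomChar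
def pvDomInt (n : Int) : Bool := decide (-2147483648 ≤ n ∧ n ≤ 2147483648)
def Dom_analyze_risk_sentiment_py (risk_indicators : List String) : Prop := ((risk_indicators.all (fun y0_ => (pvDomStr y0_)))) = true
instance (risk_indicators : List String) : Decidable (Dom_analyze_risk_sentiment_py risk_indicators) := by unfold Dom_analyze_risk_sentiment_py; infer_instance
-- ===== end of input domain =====

-- B replaces A's two filtered-count passes by one pass accumulating a signed score from a +1/-1 weight dict (objective: simpler decomposition).

-- ===== PORT A =====
def analyze_risk_sentiment_py (risk_indicators : List String) : String :=
  let risk_on_signals : List String := ["falling_yields", "gold_weakness", "dollar_weakness"]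
  let risk_off_signals : List String := ["rising_yields", "gold_strength", "dollar_strength"]
  let risk_on_count : Int :=
    risk_indicators.foldl (fun acc signal => if signal ∈ risk_on_signals then acc + 1 else acc) 0
  let risk_off_count : Int :=
    risk_indicators.foldl (fun acc signal => if signal ∈ risk_off_signals then acc + 1 else acc) 0
  if risk_off_count > risk_on_count then "risk_off"
  else if risk_on_count > risk_off_count then "risk_on"
  else "neutral"

-- ===== PORT B =====
def pvWeights : PySem.Dict String Int :=
  PySem.Dict.ofList [("falling_yields", 1), ("gold_weakness", 1), ("dollar_weakness", 1),
                     ("rising_yields", -1), ("gold_strength", -1), ("dollar_strength", -1)]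

def analyze_risk_sentiment_py_alt (risk_indicators : List String) : String :=
  let score : Int := risk_indicators.foldl (fun acc signal => acc + pvWeights.getD signal 0) 0
  if score > 0 then "risk_on"
  else if score < 0 then "risk_off"
  else "neutral"

-- ===== PRECONDITION & SPEC =====
def Spec_analyze_risk_sentiment_py (risk_indicators : List String) (out : String) : Prop := out = analyze_risk_sentiment_py_alt risk_indicators
instance (risk_indicators : List String) (out : String) : Decidable (Spec_analyze_risk_sentiment_py risk_indicators out) := by unfold Spec_analyze_risk_sentiment_py; infer_instance

-- ===== CLAIM (what is proved, stated in full; the proofs are below) =====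
def Claim_equal_analyze_risk_sentiment_py : Prop := ∀ (risk_indicators : List String), Dom_analyze_risk_sentiment_py risk_indicators → Spec_analyze_risk_sentiment_py risk_indicators (analyze_risk_sentiment_py risk_indicators)

-- ===== LEMMAS AND PROOFS =====

-- each signal's weight is (1 if risk-on) minus (1 if risk-off)
theorem pvWeights_getD (s : String) :
    pvWeights.getD s 0 =
      (if s ∈ (["falling_yields", "gold_weakness", "dollar_weakness"] : List String) then (1 : Int) else 0)
        - (if s ∈ (["rising_yields", "gold_strength", "dollar_strength"] : List String) then (1 : Int) else 0) := by
  have hw : pvWeights = PySem.Dict.mk [("falling_yields", 1), ("gold_weakness", 1), ("dollar_weakness", 1), ("rising_yields", -1), ("gold_strength", -1), ("dollar_strength", -1)] := by decide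
  rw [hw]
  simp only [PySem.Dict.getD, PySem.Dict.get?_mk_cons, List.mem_cons, List.not_mem_nil, beq_iff_eq]
  split_ifs <;> simp_all [eq_comm, PySem.Dict.get?]

-- loop invariant: B's running score is A's running on-count minus off-count
theorem score_eq (l : List String) (a b : Int) :
    l.foldl (fun acc signal => acc + pvWeights.getD signal 0) (a - b) =
      l.foldl (fun acc signal => if signal ∈ (["falling_yields", "gold_weakness", "dollar_weakness"] : List String) then acc + 1 else acc) a
        - l.foldl (fun acc signal => if signal ∈ (["rising_yields", "gold_strength", "dollar_strength"] : List String) then acc + 1 else acc) b := by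
  induction l generalizing a b with
  | nil => simp
  | cons s t ih =>
    simp only [List.foldl_cons, pvWeights_getD s]
    rw [show a - b + ((if s ∈ (["falling_yields", "gold_weakness", "dollar_weakness"] : List String) then (1:Int) else 0) - (if s ∈ (["rising_yields", "gold_strength", "dollar_strength"] : List String) then (1:Int) else 0)) = (a + (if s ∈ (["falling_yields", "gold_weakness", "dollar_weakness"] : List String) then (1:Int) else 0)) - (b + (if s ∈ (["rising_yields", "gold_strength", "dollar_strength"] : List String) then (1:Int) else 0)) by ring, ih]
    split_ifs <;> simp

-- ===== VERDICT (by name: the statement is the Claim_ definition above) =====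
theorem analyze_risk_sentiment_py_spec : Claim_equal_analyze_risk_sentiment_py := by
  intro l _
  show analyze_risk_sentiment_py l = analyze_risk_sentiment_py_alt l
  unfold analyze_risk_sentiment_py analyze_risk_sentiment_py_alt
  simp only []
  have h := score_eq l 0 0
  simp only [sub_zero] at h
  rw [h]
  split_ifs <;> first | rfl | omega
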